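-- pv_equiv track=rewrite | github.com/ghawkes1217/Conjectures-and-Computations | testing/catest.py | poss_right
-- ===== SOURCE A (Python) =====
-- def alpha(a,b,m):
--     if a<=b:
--         return(min(b-a,m))
--     if a>b:
--         return(min(a-b-1,m))
--
-- def alpha0(a,m):
--     return(max(0,a-m))
--
-- def degr(A,m):
--     d=0
--     for i in range(1,len(A)):
--         for j in range(i,len(A)):
--             d+=alpha(A[i],A[j],m)
--     for k in range(2,len(A)):
--         d-=alpha0(A[k],m)
--     return(d)
--
-- def poss_right(x,m):
--     Y=[]
--     for i in range(1,len(x)-1):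
--         for j in range(i+1,len(x)):
--             if x[i-1]-x[j]-1>=-m:
--                 if x[j]+1-x[i]>=-m:
--                     if j==len(x)-1 or x[j-1]-x[j+1]>=-m:
--                         y=x[0:i]+[x[j]+1]+x[i:j]+x[j+1:len(x)]
--                         if degr(x,m)==degr(y,m) and y not in Y:
--                             Y.append(y)
--     for i in range(1,len(x)):
--         if x[i-1]-x[i]-1>=-m:
--             y=x[0:i]+[x[i]+1]+x[i+1:len(x)]
--             if degr(x,m)==degr(y,m) and y not in Y:
--                 Y.append(y)
--     return(Y)
-- ===== SOURCE B (Python) =====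
-- def poss_right(x, m):
--     # O(n^3): degr(y) is never recomputed; the degree change of each shift is
--     # computed incrementally in O(n) from the single moved element.
--     n = len(x)
--
--     def al(a, b):
--         return min(b - a, m) if a <= b else min(a - b - 1, m)
--
--     def a0(c):
--         return max(0, c - m)
--
--     seen = set()
--     out = []
--
--     def emit(y):
--         t = tuple(y)
--         if t not in seen:
--             seen.add(t)
--             out.append(y)
--
--     for i in range(1, n - 1):
--         for j in range(i + 1, n):
--             if (x[i - 1] - x[j] - 1 >= -m and x[j] + 1 - x[i] >= -m
--                     and (j == n - 1 or x[j - 1] - x[j + 1] >= -m)):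
--                 c = x[j]
--                 v = c + 1
--                 d = al(v, v) - al(c, c)
--                 for b in x[1:i]:
--                     d += al(b, v) - al(b, c)
--                 for b in x[i:j]:
--                     d += al(v, b) - al(b, c)
--                 for b in x[j + 1:]:
--                     d += al(v, b) - al(c, b)
--                 dz = (a0(v) - a0(c)) if i >= 2 else (a0(x[1]) - a0(c))
--                 if d - dz == 0:
--                     emit(x[:i] + [v] + x[i:j] + x[j + 1:])
--     for i in range(1, n):
--         if x[i - 1] - x[i] - 1 >= -m:
--             c = x[i]
--             v = c + 1
--             d = al(v, v) - al(c, c)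
--             for b in x[1:i]:
--                 d += al(b, v) - al(b, c)
--             for b in x[i + 1:]:
--                 d += al(v, b) - al(c, b)
--             dz = (a0(v) - a0(c)) if i >= 2 else 0
--             if d - dz == 0:
--                 emit(x[:i] + [v] + x[i + 1:])
--     return out
-- ===== Notes on version B (the rewrite author's own statement) =====
-- stated objective: faster
-- what changed: B never computes degr(y): for each candidate shift it computes the degree change incrementally in O(n) from the single moved element (pair-sum differences against the three unchanged segments plus the alpha0 correction), turning the O(n^2)-per-candidate degr recomputation into O(n), and dedups with a hash set in one streaming pass.
import Mathlib
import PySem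

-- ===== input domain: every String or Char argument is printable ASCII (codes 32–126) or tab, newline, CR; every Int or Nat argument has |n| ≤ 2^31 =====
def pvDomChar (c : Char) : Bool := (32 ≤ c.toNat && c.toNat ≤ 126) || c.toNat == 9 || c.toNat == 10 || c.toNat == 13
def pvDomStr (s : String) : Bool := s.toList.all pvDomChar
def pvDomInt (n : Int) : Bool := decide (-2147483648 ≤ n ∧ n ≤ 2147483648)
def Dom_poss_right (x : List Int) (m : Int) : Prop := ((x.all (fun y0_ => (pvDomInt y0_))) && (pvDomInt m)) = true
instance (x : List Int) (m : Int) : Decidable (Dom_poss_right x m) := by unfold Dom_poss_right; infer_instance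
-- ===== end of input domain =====

-- B replaces A's per-candidate degr(y) recomputation by an O(n) incremental degree change
-- computed from the single moved element, and dedups with a set: O(n^3) instead of O(n^4).

-- ===== PORT A =====
def pvAlpha (a b m : Int) : Int :=
  if a ≤ b then min (b - a) m else min (a - b - 1) m

def pvAlpha0 (a m : Int) : Int := max 0 (a - m)

def pvDegr (A : List Int) (m : Int) : Int :=
  (PySem.List.pyRange 2 (A.length : Int)).foldl
    (fun d k => d - pvAlpha0 (PySem.List.pyGetD A k 0) m)
    ((PySem.List.pyRange 1 (A.length : Int)).foldl
      (fun d i => (PySem.List.pyRange i (A.length : Int)).foldl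
        (fun d j => d + pvAlpha (PySem.List.pyGetD A i 0) (PySem.List.pyGetD A j 0) m) d) 0)

def poss_right (x : List Int) (m : Int) : List (List Int) :=
  (PySem.List.pyRange 1 (x.length : Int)).foldl
    (fun Y i =>
      if PySem.List.pyGetD x (i - 1) 0 - PySem.List.pyGetD x i 0 - 1 ≥ -m then
        let y := PySem.List.slice x (some 0) (some i) ++ [PySem.List.pyGetD x i 0 + 1] ++
                 PySem.List.slice x (some (i + 1)) (some (x.length : Int))
        if pvDegr x m = pvDegr y m ∧ y ∉ Y then Y ++ [y] else Y
      else Y)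
    ((PySem.List.pyRange 1 ((x.length : Int) - 1)).foldl
      (fun Y i => (PySem.List.pyRange (i + 1) (x.length : Int)).foldl
        (fun Y j =>
          if PySem.List.pyGetD x (i - 1) 0 - PySem.List.pyGetD x j 0 - 1 ≥ -m then
            if PySem.List.pyGetD x j 0 + 1 - PySem.List.pyGetD x i 0 ≥ -m then
              if j = (x.length : Int) - 1 ∨ PySem.List.pyGetD x (j - 1) 0 - PySem.List.pyGetD x (j + 1) 0 ≥ -m then
                let y := PySem.List.slice x (some 0) (some i) ++ [PySem.List.pyGetD x j 0 + 1] ++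
                         PySem.List.slice x (some i) (some j) ++ PySem.List.slice x (some (j + 1)) (some (x.length : Int))
                if pvDegr x m = pvDegr y m ∧ y ∉ Y then Y ++ [y] else Y
              else Y
            else Y
          else Y) Y) [])

-- ===== PORT B =====
-- Source B's al / a0
def pvAl (m a b : Int) : Int := if a ≤ b then min (b - a) m else min (a - b - 1) m
def pvA0 (m c : Int) : Int := max 0 (c - m)

-- the three delta-accumulating loops of the (i,j)-shift case of Source B
def pvDelta1 (x : List Int) (m i j : Int) : Int :=
  let c := PySem.List.pyGetD x j 0
  let v := c + 1
  let d0 := pvAl m v v - pvAl m c c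
  let d1 := (PySem.List.slice x (some 1) (some i)).foldl (fun d b => d + (pvAl m b v - pvAl m b c)) d0
  let d2 := (PySem.List.slice x (some i) (some j)).foldl (fun d b => d + (pvAl m v b - pvAl m b c)) d1
  (PySem.List.slice x (some (j + 1)) none).foldl (fun d b => d + (pvAl m v b - pvAl m c b)) d2

def pvDz1 (x : List Int) (m i j : Int) : Int :=
  let c := PySem.List.pyGetD x j 0
  if 2 ≤ i then pvA0 m (c + 1) - pvA0 m c else pvA0 m (PySem.List.pyGetD x 1 0) - pvA0 m c

-- the two delta-accumulating loops of the in-place case of Source B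
def pvDelta2 (x : List Int) (m i : Int) : Int :=
  let c := PySem.List.pyGetD x i 0
  let v := c + 1
  let d0 := pvAl m v v - pvAl m c c
  let d1 := (PySem.List.slice x (some 1) (some i)).foldl (fun d b => d + (pvAl m b v - pvAl m b c)) d0
  (PySem.List.slice x (some (i + 1)) none).foldl (fun d b => d + (pvAl m v b - pvAl m c b)) d1

def pvDz2 (x : List Int) (m i : Int) : Int :=
  let c := PySem.List.pyGetD x i 0
  if 2 ≤ i then pvA0 m (c + 1) - pvA0 m c else 0

-- Source B's emit: seen-set guarded append
def pvEmit (st : PySem.Set (List Int) × List (List Int)) (y : List Int) :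
    PySem.Set (List Int) × List (List Int) :=
  if y ∈ st.1 then st else (PySem.Set.add st.1 y, st.2 ++ [y])

def poss_right_alt (x : List Int) (m : Int) : List (List Int) :=
  ((PySem.List.pyRange 1 (x.length : Int)).foldl (fun st i =>
      if PySem.List.pyGetD x (i - 1) 0 - PySem.List.pyGetD x i 0 - 1 ≥ -m then
        if pvDelta2 x m i - pvDz2 x m i = 0 then
          pvEmit st (PySem.List.slice x (some 0) (some i) ++ [PySem.List.pyGetD x i 0 + 1] ++
                     PySem.List.slice x (some (i + 1)) none)
        else st
      else st)
    ((PySem.List.pyRange 1 ((x.length : Int) - 1)).foldl (fun st i =>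
      (PySem.List.pyRange (i + 1) (x.length : Int)).foldl (fun st j =>
        if PySem.List.pyGetD x (i - 1) 0 - PySem.List.pyGetD x j 0 - 1 ≥ -m ∧
           PySem.List.pyGetD x j 0 + 1 - PySem.List.pyGetD x i 0 ≥ -m ∧
           (j = (x.length : Int) - 1 ∨ PySem.List.pyGetD x (j - 1) 0 - PySem.List.pyGetD x (j + 1) 0 ≥ -m) then
          if pvDelta1 x m i j - pvDz1 x m i j = 0 then
            pvEmit st (PySem.List.slice x (some 0) (some i) ++ [PySem.List.pyGetD x j 0 + 1] ++
                       PySem.List.slice x (some i) (some j) ++ PySem.List.slice x (some (j + 1)) none)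
          else st
        else st) st)
      ((PySem.Set.empty : PySem.Set (List Int)), ([] : List (List Int))))).2

-- ===== PRECONDITION & SPEC =====
def Spec_poss_right (x : List Int) (m : Int) (out : List (List Int)) : Prop := out = poss_right_alt x m
instance (x : List Int) (m : Int) (out : List (List Int)) : Decidable (Spec_poss_right x m out) := by unfold Spec_poss_right; infer_instance

-- ===== CLAIM (what is proved, stated in full; the proofs are below) =====
def Claim_equal_poss_right : Prop := ∀ (x : List Int) (m : Int), Dom_poss_right x m → Spec_poss_right x m (poss_right x m)

-- ===== LEMMAS AND PROOFS =====

-- tail-recursive pair sum: pvPS m l = Σ_{p ≤ q} alpha(l[p], l[q]) including diagonals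
def pvPS (m : Int) : List Int → Int
  | [] => 0
  | a :: t => pvAl m a a + (t.map (pvAl m a)).sum + pvPS m t

-- accumulator form matching A's triangular double loop
def pvPairLoop (m : Int) : List Int → Int → Int
  | [], d => d
  | a :: t, d =>
      pvPairLoop m t ((a :: t).foldl (fun d b => d + pvAl m a b) d)

theorem pvPairLoop_eq (A : List Int) (m : Int) :
    ∀ (n : Nat) (k : Nat) (d : Int), A.length - k = n →
    (PySem.List.pyRange (k : Int) (A.length : Int)).foldl
      (fun d i => (PySem.List.pyRange i (A.length : Int)).foldl
        (fun d j => d + pvAlpha (PySem.List.pyGetD A i 0) (PySem.List.pyGetD A j 0) m) d) d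
    = pvPairLoop m (A.drop k) d := by
  intro n
  induction n with
  | zero =>
    intro k d hk
    have hle : A.length ≤ k := by omega
    rw [PySem.List.pyRange_one_eq_nil (by exact_mod_cast hle), List.drop_eq_nil_of_le hle]
    rfl
  | succ n' ih =>
    intro k d hk
    have hlt : k < A.length := by omega
    rw [PySem.List.pyRange_one_cons (by exact_mod_cast hlt), List.foldl_cons]
    rw [PySem.List.foldl_pyRange_pyGetD' A 0
      (fun d b => d + pvAlpha (PySem.List.pyGetD A (k : Int) 0) b m) d (by positivity)]
    rw [show ((k : Int) + 1) = ((k + 1 : Nat) : Int) by push_cast; ring]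
    rw [ih (k + 1) _ (by omega)]
    rw [List.drop_eq_getElem_cons hlt]
    show pvPairLoop m (A.drop (k+1)) _ = pvPairLoop m (A.drop (k+1)) _
    congr 1
    simp only [Int.toNat_natCast, List.drop_eq_getElem_cons hlt]
    have hget : PySem.List.pyGetD A (k : Int) 0 = A[k] := by
      rw [PySem.List.pyGetD_natCast, List.getD_eq_getElem _ _ hlt]
    rw [hget]
    simp [pvAlpha, pvAl]

theorem pvPairLoop_PS (m : Int) (t : List Int) : ∀ d, pvPairLoop m t d = d + pvPS m t := by
  induction t with
  | nil => intro d; simp [pvPairLoop, pvPS]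
  | cons a t ih =>
    intro d
    show pvPairLoop m t _ = _
    rw [ih, PySem.List.foldl_add]
    simp only [pvPS, List.map_cons, List.sum_cons]
    ring

theorem sum_map_sub (f g : Int → Int) (l : List Int) :
    (l.map (fun b => f b - g b)).sum = (l.map f).sum - (l.map g).sum := by
  induction l with
  | nil => simp
  | cons a t ih => simp only [List.map_cons, List.sum_cons, ih]; ring

-- characterisation of A's degr
theorem pvDegr_char (A : List Int) (m : Int) :
    pvDegr A m = pvPS m (A.drop 1) - ((A.drop 2).map (fun c => pvA0 m c)).sum := by
  have hsub : ∀ (l : List Int) (s : Int),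
      l.foldl (fun d c => d - pvAlpha0 c m) s = s - (l.map (fun c => pvA0 m c)).sum := by
    intro l
    induction l with
    | nil => intro s; simp
    | cons a t ih =>
      intro s
      simp only [List.foldl_cons, List.map_cons, List.sum_cons, ih]
      show s - pvAlpha0 a m - _ = _
      simp only [pvAlpha0, pvA0]
      ring
  unfold pvDegr
  rw [PySem.List.foldl_pyRange_pyGetD' A 0 (fun d c => d - pvAlpha0 c m) _
        (by norm_num : (0:Int) ≤ 2)]
  have h1 := pvPairLoop_eq A m (A.length - 1) 1 0 rfl
  have h1' : (PySem.List.pyRange 1 (A.length : Int)).foldl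
      (fun d i => (PySem.List.pyRange i (A.length : Int)).foldl
        (fun d j => d + pvAlpha (PySem.List.pyGetD A i 0) (PySem.List.pyGetD A j 0) m) d) 0
      = pvPairLoop m (A.drop 1) 0 := by simpa using h1
  rw [h1', hsub, pvPairLoop_PS]
  simp

-- inserting one value c into the pair sum adds its row and column
theorem pvPS_insert (m c : Int) (u w : List Int) :
    pvPS m (u ++ c :: w) = pvPS m (u ++ w) + (u.map (fun b => pvAl m b c)).sum
      + (w.map (pvAl m c)).sum + pvAl m c c := by
  induction u with
  | nil => simp only [List.nil_append, pvPS, List.map_nil, List.sum_nil]; ring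
  | cons a u ih =>
    simp only [List.cons_append, pvPS, List.map_append, List.sum_append, List.map_cons,
      List.sum_cons, ih]
    ring

-- the degree-change of inserting v where c stood (all positions value-based, order preserved)
theorem pvPS_shift (m c v : Int) (u M w : List Int) :
    pvPS m (u ++ [v] ++ (M ++ w)) - pvPS m (u ++ (M ++ ([c] ++ w)))
    = (pvAl m v v - pvAl m c c)
      + (u.map (fun b => pvAl m b v - pvAl m b c)).sum
      + (M.map (fun b => pvAl m v b - pvAl m b c)).sum
      + (w.map (fun b => pvAl m v b - pvAl m c b)).sum := by
  rw [show u ++ [v] ++ (M ++ w) = u ++ v :: (M ++ w) by simp]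
  rw [show u ++ (M ++ ([c] ++ w)) = (u ++ M) ++ c :: w by simp]
  rw [pvPS_insert m v u (M ++ w), pvPS_insert m c (u ++ M) w, List.append_assoc]
  simp only [List.map_append, List.sum_append]
  rw [sum_map_sub (fun b => pvAl m b v) (fun b => pvAl m b c) u,
      sum_map_sub (fun b => pvAl m v b) (fun b => pvAl m b c) M,
      sum_map_sub (fun b => pvAl m v b) (fun b => pvAl m c b) w]
  ring

-- trailing slices with explicit and omitted stop agree
theorem slice_tail_eq (x : List Int) (k : Int) (hk : 0 ≤ k) :
    PySem.List.slice x (some k) (some (x.length : Int)) = PySem.List.slice x (some k) none := by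
  rw [PySem.List.slice_toNat (xs := x) (a := k) (b := (x.length : Int)) hk (by positivity),
      PySem.List.slice_from x hk]
  exact List.take_of_length_le (by simp)

-- A's degr test on the (i,j)-shift candidate is B's incremental delta test
theorem cond1 (x : List Int) (m : Int) (i j : Int)
    (hi1 : 1 ≤ i) (hij : i < j) (hj : j < (x.length : Int)) :
    (pvDegr x m =
      pvDegr (PySem.List.slice x (some 0) (some i) ++ [PySem.List.pyGetD x j 0 + 1] ++
              PySem.List.slice x (some i) (some j) ++
              PySem.List.slice x (some (j + 1)) (some (x.length : Int))) m)
    ↔ pvDelta1 x m i j - pvDz1 x m i j = 0 := by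
  obtain ⟨i', rfl⟩ : ∃ k : Nat, i = (k : Int) := ⟨i.toNat, by omega⟩
  obtain ⟨j', rfl⟩ : ∃ k : Nat, j = (k : Int) := ⟨j.toNat, by omega⟩
  have hi1' : 1 ≤ i' := by exact_mod_cast hi1
  have hij' : i' < j' := by exact_mod_cast hij
  have hj' : j' < x.length := by exact_mod_cast hj
  set u := (x.drop 1).take (i' - 1) with hu
  set M := (x.drop i').take (j' - i') with hM
  set w := x.drop (j' + 1) with hw
  have hc : PySem.List.pyGetD x (j' : Int) 0 = x[j'] := by
    rw [PySem.List.pyGetD_natCast, List.getD_eq_getElem _ _ hj']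
  -- slice rewrites
  have e_u : PySem.List.slice x (some 1) (some (i' : Int)) = u := by
    have h := PySem.List.slice_natCast x 1 i'
    push_cast at h
    exact h
  have e_M : PySem.List.slice x (some (i' : Int)) (some (j' : Int)) = M :=
    PySem.List.slice_natCast x i' j'
  have e_w : PySem.List.slice x (some ((j' : Int) + 1)) none = w := by
    rw [show ((j' : Int) + 1) = ((j' + 1 : Nat) : Int) by push_cast; ring,
        PySem.List.slice_from_natCast]
  have e_w2 : PySem.List.slice x (some ((j' : Int) + 1)) (some (x.length : Int)) = w := by
    rw [slice_tail_eq x _ (by positivity)]; exact e_w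
  have e_pre : PySem.List.slice x (some 0) (some (i' : Int)) = x.take i' := by
    simp [PySem.List.slice_to_natCast]
  -- drop decompositions of x
  have hd3 : x.drop j' = x[j'] :: w := List.drop_eq_getElem_cons hj'
  have hd2a : x.drop i' = M ++ x.drop j' := by
    conv_lhs => rw [← List.take_append_drop (j' - i') (x.drop i')]
    rw [List.drop_drop, show i' + (j' - i') = j' by omega]
  have hd1 : x.drop 1 = u ++ (M ++ ([x[j']] ++ w)) := by
    conv_lhs => rw [← List.take_append_drop (i' - 1) (x.drop 1)]
    rw [List.drop_drop, show 1 + (i' - 1) = i' by omega, hd2a, hd3]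
    simp [hu]
  have hlen_take : (x.take i').length = i' := by
    rw [List.length_take]; omega
  have hy1 : (x.take i' ++ ([x[j'] + 1] ++ (M ++ w))).drop 1
      = u ++ [x[j'] + 1] ++ (M ++ w) := by
    rw [List.drop_append_of_le_length (by omega), List.drop_take, ← hu]
    exact (List.append_assoc u [x[j'] + 1] (M ++ w)).symm
  -- degr of both sides
  rw [pvDegr_char x m, e_pre, hc, e_M, e_w2, pvDegr_char _ m]
  rw [show x.take i' ++ [x[j'] + 1] ++ M ++ w = x.take i' ++ ([x[j'] + 1] ++ (M ++ w)) by simp]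
  rw [hy1, hd1]
  have hshift := pvPS_shift m (x[j']) (x[j'] + 1) u M w
  -- B's delta
  have hdelta : pvDelta1 x m (i' : Int) (j' : Int)
      = pvPS m (u ++ [x[j'] + 1] ++ (M ++ w)) - pvPS m (u ++ (M ++ ([x[j']] ++ w))) := by
    rw [hshift]
    simp only [pvDelta1, hc, e_u, e_M, e_w, PySem.List.foldl_add]
  -- alpha0 part
  have hz : (((x.take i' ++ ([x[j'] + 1] ++ (M ++ w))).drop 2).map (fun cc => pvA0 m cc)).sum
      = ((x.drop 2).map (fun cc => pvA0 m cc)).sum + pvDz1 x m (i' : Int) (j' : Int) := by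
    by_cases h2 : 2 ≤ i'
    · have t2 : (x.drop 2).drop (i' - 2) = x.drop i' := by
        rw [List.drop_drop, show 2 + (i' - 2) = i' by omega]
      have hx2 : x.drop 2 = (x.drop 2).take (i' - 2) ++ (M ++ ([x[j']] ++ w)) := by
        conv_lhs => rw [← List.take_append_drop (i' - 2) (x.drop 2)]
        rw [t2, hd2a, hd3]; simp
      have hy2 : (x.take i' ++ ([x[j'] + 1] ++ (M ++ w))).drop 2
          = (x.drop 2).take (i' - 2) ++ ([x[j'] + 1] ++ (M ++ w)) := by
        rw [List.drop_append_of_le_length (by omega), List.drop_take]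
      rw [hy2]
      conv_rhs => rw [hx2]
      simp only [pvDz1, hc, if_pos (show 2 ≤ (i' : Int) by exact_mod_cast h2),
        List.map_append, List.sum_append, List.map_cons, List.sum_cons, List.map_nil,
        List.sum_nil]
      ring
    · have hieq : i' = 1 := by omega
      subst hieq
      have hM1 : M = x[1] :: (x.drop 2).take (j' - 2) := by
        rw [hM]
        rw [List.drop_eq_getElem_cons (show 1 < x.length by omega)]
        rw [show j' - 1 = (j' - 2) + 1 by omega, List.take_succ_cons]
      have hx2 : x.drop 2 = (x.drop 2).take (j' - 2) ++ ([x[j']] ++ w) := by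
        have t3 : (x.drop 2).drop (j' - 2) = x.drop j' := by
          rw [List.drop_drop, show 2 + (j' - 2) = j' by omega]
        conv_lhs => rw [← List.take_append_drop (j' - 2) (x.drop 2)]
        rw [t3, hd3]; simp
      have hx0 : x.take 1 = [x[0]] := by
        have h0 : x = x[0] :: x.drop 1 := by
          conv_lhs => rw [show x = x.drop 0 from rfl]
          rw [List.drop_eq_getElem_cons (show 0 < x.length by omega)]
        conv_lhs => rw [h0]
        simp
      have hy2 : (x.take 1 ++ ([x[j'] + 1] ++ (M ++ w))).drop 2 = M ++ w := by
        rw [hx0]; simp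
      have hget1 : PySem.List.pyGetD x (1 : Int) 0 = x[1] := by
        rw [show (1 : Int) = ((1 : Nat) : Int) from rfl, PySem.List.pyGetD_natCast,
          List.getD_eq_getElem _ _ (show 1 < x.length by omega)]
      rw [hy2]
      conv_lhs => rw [hM1]
      conv_rhs => rw [hx2]
      simp only [pvDz1, hc, hget1, if_neg (show ¬ (2 ≤ ((1 : Nat) : Int)) by norm_num),
        List.map_append, List.sum_append, List.map_cons, List.sum_cons, List.map_nil,
        List.sum_nil]
      ring
  rw [hz, hdelta]
  constructor <;> intro h <;> omega

-- A's degr test on the in-place candidate is B's incremental delta test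
theorem cond2 (x : List Int) (m : Int) (i : Int)
    (hi1 : 1 ≤ i) (hi : i < (x.length : Int)) :
    (pvDegr x m =
      pvDegr (PySem.List.slice x (some 0) (some i) ++ [PySem.List.pyGetD x i 0 + 1] ++
              PySem.List.slice x (some (i + 1)) (some (x.length : Int))) m)
    ↔ pvDelta2 x m i - pvDz2 x m i = 0 := by
  obtain ⟨i', rfl⟩ : ∃ k : Nat, i = (k : Int) := ⟨i.toNat, by omega⟩
  have hi1' : 1 ≤ i' := by exact_mod_cast hi1
  have hi' : i' < x.length := by exact_mod_cast hi
  set u := (x.drop 1).take (i' - 1) with hu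
  set w := x.drop (i' + 1) with hw
  have hc : PySem.List.pyGetD x (i' : Int) 0 = x[i'] := by
    rw [PySem.List.pyGetD_natCast, List.getD_eq_getElem _ _ hi']
  have e_u : PySem.List.slice x (some 1) (some (i' : Int)) = u := by
    have h := PySem.List.slice_natCast x 1 i'
    push_cast at h
    exact h
  have e_w : PySem.List.slice x (some ((i' : Int) + 1)) none = w := by
    rw [show ((i' : Int) + 1) = ((i' + 1 : Nat) : Int) by push_cast; ring,
        PySem.List.slice_from_natCast]
  have e_w2 : PySem.List.slice x (some ((i' : Int) + 1)) (some (x.length : Int)) = w := by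
    rw [slice_tail_eq x _ (by positivity)]; exact e_w
  have e_pre : PySem.List.slice x (some 0) (some (i' : Int)) = x.take i' := by
    simp [PySem.List.slice_to_natCast]
  have hd3 : x.drop i' = x[i'] :: w := List.drop_eq_getElem_cons hi'
  have hd1 : x.drop 1 = u ++ ([x[i']] ++ w) := by
    conv_lhs => rw [← List.take_append_drop (i' - 1) (x.drop 1)]
    rw [List.drop_drop, show 1 + (i' - 1) = i' by omega, hd3]
    simp [hu]
  have hlen_take : (x.take i').length = i' := by rw [List.length_take]; omega
  have hy1 : (x.take i' ++ ([x[i'] + 1] ++ w)).drop 1 = u ++ [x[i'] + 1] ++ w := by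
    rw [List.drop_append_of_le_length (by omega), List.drop_take, ← hu]
    exact (List.append_assoc u [x[i'] + 1] w).symm
  rw [pvDegr_char x m, e_pre, hc, e_w2, pvDegr_char _ m]
  rw [show x.take i' ++ [x[i'] + 1] ++ w = x.take i' ++ ([x[i'] + 1] ++ w) by simp]
  rw [hy1, hd1]
  have hshift := pvPS_shift m (x[i']) (x[i'] + 1) u [] w
  simp only [List.nil_append, List.map_nil, List.sum_nil] at hshift
  have hdelta : pvDelta2 x m (i' : Int)
      = pvPS m (u ++ [x[i'] + 1] ++ w) - pvPS m (u ++ ([x[i']] ++ w)) := by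
    rw [hshift]
    simp only [pvDelta2, hc, e_u, e_w, PySem.List.foldl_add]
    ring
  have hz : (((x.take i' ++ ([x[i'] + 1] ++ w)).drop 2).map (fun cc => pvA0 m cc)).sum
      = ((x.drop 2).map (fun cc => pvA0 m cc)).sum + pvDz2 x m (i' : Int) := by
    by_cases h2 : 2 ≤ i'
    · have hx2 : x.drop 2 = (x.drop 2).take (i' - 2) ++ ([x[i']] ++ w) := by
        have t2 : (x.drop 2).drop (i' - 2) = x.drop i' := by
          rw [List.drop_drop, show 2 + (i' - 2) = i' by omega]
        conv_lhs => rw [← List.take_append_drop (i' - 2) (x.drop 2)]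
        rw [t2, hd3]; simp
      have hy2 : (x.take i' ++ ([x[i'] + 1] ++ w)).drop 2
          = (x.drop 2).take (i' - 2) ++ ([x[i'] + 1] ++ w) := by
        rw [List.drop_append_of_le_length (by omega), List.drop_take]
      rw [hy2]
      conv_rhs => rw [hx2]
      simp only [pvDz2, hc, if_pos (show (2:Int) ≤ ((i' : Nat) : Int) by exact_mod_cast h2),
        List.map_append, List.sum_append, List.map_cons, List.sum_cons, List.map_nil,
        List.sum_nil]
      ring
    · have hieq : i' = 1 := by omega
      subst hieq
      have hx0 : x.take 1 = [x[0]] := by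
        have h0 : x = x[0] :: x.drop 1 := by
          conv_lhs => rw [show x = x.drop 0 from rfl]
          rw [List.drop_eq_getElem_cons (show 0 < x.length by omega)]
        conv_lhs => rw [h0]
        simp
      have hy2 : (x.take 1 ++ ([x[1] + 1] ++ w)).drop 2 = w := by
        rw [hx0]; simp
      rw [hy2, hw]
      simp [pvDz2]
  rw [hz, hdelta]
  constructor <;> intro h <;> omega

-- simulation relation between A's list state and B's (seen, out) state
def pvR (Y : List (List Int)) (st : PySem.Set (List Int) × List (List Int)) : Prop :=
  st.2 = Y ∧ ∀ z : List Int, z ∈ st.1 ↔ z ∈ Y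

theorem foldl_rel {ι α β : Type} (R : α → β → Prop) (l : List ι)
    (fA : α → ι → α) (fB : β → ι → β)
    (h : ∀ i ∈ l, ∀ a b, R a b → R (fA a i) (fB b i)) :
    ∀ a b, R a b → R (l.foldl fA a) (l.foldl fB b) := by
  induction l with
  | nil => intro a b hab; exact hab
  | cons i t ih =>
    intro a b hab
    exact ih (fun i' hi' => h i' (List.mem_cons_of_mem _ hi')) _ _ (h i (List.mem_cons_self) a b hab)

theorem pvR_append (y : List Int) (Y : List (List Int)) (st : PySem.Set (List Int) × List (List Int))
    (h : pvR Y st) :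
    pvR (if y ∉ Y then Y ++ [y] else Y) (pvEmit st y) := by
  obtain ⟨h2, h1⟩ := h
  unfold pvEmit
  by_cases hy : y ∈ Y
  · rw [if_neg (by simpa using hy), if_pos ((h1 y).2 hy)]
    exact ⟨h2, h1⟩
  · rw [if_pos hy, if_neg (fun hmem => hy ((h1 y).1 hmem))]
    exact ⟨by simp [h2], by intro z; simp [PySem.Set.mem_add, h1 z]⟩

theorem pvR_branch (yv : List Int) (P Q : Prop) [Decidable P] [Decidable Q] (hPQ : P ↔ Q)
    (Y : List (List Int)) (st : PySem.Set (List Int) × List (List Int)) (h : pvR Y st) :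
    pvR (if P ∧ yv ∉ Y then Y ++ [yv] else Y) (if Q then pvEmit st yv else st) := by
  by_cases hP : P
  · rw [if_pos (hPQ.1 hP)]
    have happ := pvR_append yv Y st h
    by_cases hy : yv ∈ Y
    · rw [if_neg (fun hc => hc.2 hy)]
      simpa [hy] using happ
    · rw [if_pos ⟨hP, hy⟩]
      simpa [hy] using happ
  · rw [if_neg (fun hc => hP hc.1), if_neg (fun hq => hP (hPQ.2 hq))]
    exact h

theorem main_eq (x : List Int) (m : Int) : poss_right x m = poss_right_alt x m := by
  have step1 : ∀ i ∈ PySem.List.pyRange 1 ((x.length : Int) - 1),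
      ∀ Y st, pvR Y st →
      pvR ((PySem.List.pyRange (i + 1) (x.length : Int)).foldl
        (fun Y j =>
          if PySem.List.pyGetD x (i - 1) 0 - PySem.List.pyGetD x j 0 - 1 ≥ -m then
            if PySem.List.pyGetD x j 0 + 1 - PySem.List.pyGetD x i 0 ≥ -m then
              if j = (x.length : Int) - 1 ∨ PySem.List.pyGetD x (j - 1) 0 - PySem.List.pyGetD x (j + 1) 0 ≥ -m then
                let y := PySem.List.slice x (some 0) (some i) ++ [PySem.List.pyGetD x j 0 + 1] ++
                         PySem.List.slice x (some i) (some j) ++ PySem.List.slice x (some (j + 1)) (some (x.length : Int))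
                if pvDegr x m = pvDegr y m ∧ y ∉ Y then Y ++ [y] else Y
              else Y
            else Y
          else Y) Y)
      ((PySem.List.pyRange (i + 1) (x.length : Int)).foldl
        (fun st j =>
          if PySem.List.pyGetD x (i - 1) 0 - PySem.List.pyGetD x j 0 - 1 ≥ -m ∧
             PySem.List.pyGetD x j 0 + 1 - PySem.List.pyGetD x i 0 ≥ -m ∧
             (j = (x.length : Int) - 1 ∨ PySem.List.pyGetD x (j - 1) 0 - PySem.List.pyGetD x (j + 1) 0 ≥ -m) then
            if pvDelta1 x m i j - pvDz1 x m i j = 0 then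
              pvEmit st (PySem.List.slice x (some 0) (some i) ++ [PySem.List.pyGetD x j 0 + 1] ++
                         PySem.List.slice x (some i) (some j) ++ PySem.List.slice x (some (j + 1)) none)
            else st
          else st) st) := by
    intro i hi Y st hR
    have hi' := (PySem.List.mem_pyRange_one).1 hi
    refine foldl_rel pvR _ _ _ ?_ Y st hR
    intro j hj Y' st' hR'
    have hj' := (PySem.List.mem_pyRange_one).1 hj
    by_cases g1 : PySem.List.pyGetD x (i - 1) 0 - PySem.List.pyGetD x j 0 - 1 ≥ -m
    · by_cases g2 : PySem.List.pyGetD x j 0 + 1 - PySem.List.pyGetD x i 0 ≥ -m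
      · by_cases g3 : j = (x.length : Int) - 1 ∨
            PySem.List.pyGetD x (j - 1) 0 - PySem.List.pyGetD x (j + 1) 0 ≥ -m
        · simp only [if_pos g1, if_pos g2, if_pos g3,
            if_pos (show _ ∧ _ ∧ _ from ⟨g1, g2, g3⟩)]
          rw [← slice_tail_eq x (j + 1) (by omega)]
          exact pvR_branch _ _ _ (cond1 x m i j (by omega) (by omega) (by omega)) Y' st' hR'
        · rw [if_pos g1, if_pos g2, if_neg g3, if_neg (fun hc => g3 hc.2.2)]
          exact hR'
      · rw [if_pos g1, if_neg g2, if_neg (fun hc => g2 hc.2.1)]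
        exact hR'
    · rw [if_neg g1, if_neg (fun hc => g1 hc.1)]
      exact hR'
  have step2 : ∀ i ∈ PySem.List.pyRange 1 (x.length : Int),
      ∀ Y st, pvR Y st →
      pvR ((fun Y i =>
          if PySem.List.pyGetD x (i - 1) 0 - PySem.List.pyGetD x i 0 - 1 ≥ -m then
            let y := PySem.List.slice x (some 0) (some i) ++ [PySem.List.pyGetD x i 0 + 1] ++
                     PySem.List.slice x (some (i + 1)) (some (x.length : Int))
            if pvDegr x m = pvDegr y m ∧ y ∉ Y then Y ++ [y] else Y
          else Y) Y i)
        ((fun st i =>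
          if PySem.List.pyGetD x (i - 1) 0 - PySem.List.pyGetD x i 0 - 1 ≥ -m then
            if pvDelta2 x m i - pvDz2 x m i = 0 then
              pvEmit st (PySem.List.slice x (some 0) (some i) ++ [PySem.List.pyGetD x i 0 + 1] ++
                         PySem.List.slice x (some (i + 1)) none)
            else st
          else st) st i) := by
    intro i hi Y st hR
    have hi' := (PySem.List.mem_pyRange_one).1 hi
    beta_reduce
    by_cases g1 : PySem.List.pyGetD x (i - 1) 0 - PySem.List.pyGetD x i 0 - 1 ≥ -m
    · simp only [if_pos g1]
      rw [← slice_tail_eq x (i + 1) (by omega)]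
      exact pvR_branch _ _ _ (cond2 x m i (by omega) (by omega)) Y st hR
    · rw [if_neg g1, if_neg g1]
      exact hR
  have h0 : pvR [] ((PySem.Set.empty : PySem.Set (List Int)), ([] : List (List Int))) :=
    ⟨rfl, by intro z; simp [PySem.Set.empty]⟩
  have h1 := foldl_rel pvR (PySem.List.pyRange 1 ((x.length : Int) - 1)) _ _ step1 _ _ h0
  have h2 := foldl_rel pvR (PySem.List.pyRange 1 (x.length : Int)) _ _ step2 _ _ h1
  exact h2.1.symm

-- ===== VERDICT (by name: the statement is the Claim_ definition above) =====
theorem poss_right_spec : Claim_equal_poss_right := by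
  intro x m _
  unfold Spec_poss_right
  exact main_eq x m
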